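-- pv_equiv track=rewrite | github.com/elmernocon/fillenv | src/fillenv/parser.py | split_key_value
-- ===== SOURCE A (Python) =====
-- def split_key_value(s: str) -> tuple[str | None, str | None]:
--     """Split a line into ``(key, value)`` on the first unquoted ``=`` or ``:``.
--
--     Returns ``(None, None)`` when no separator is found.
--     """
--
--     in_single = False
--     in_double = False
--     escaped = False
--     for idx, ch in enumerate(s):
--         if escaped:
--             escaped = False
--             continue
--         if ch == "\\":
--             escaped = True
--             continue
--         if ch == "'" and not in_double:
--             in_single = not in_single
--             continue
--         if ch == '"' and not in_single:
--             in_double = not in_double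
--             continue
--         if not in_single and not in_double and (ch == "=" or ch == ":"):
--             key = s[:idx].strip()
--             val = s[idx + 1 :].strip()
--             return key, val
--     return None, None
-- ===== SOURCE B (Python) =====
-- def split_key_value(s: str) -> tuple[str | None, str | None]:
--     """Split a line into ``(key, value)`` on the first unquoted ``=`` or ``:``.
--
--     Returns ``(None, None)`` when no separator is found.
--
--     Structured scanner: instead of a flag-based state machine, consume
--     escape pairs and whole quoted regions with an inner skipping loop.
--     """
--     i, n = 0, len(s)
--     while i < n:
--         ch = s[i]
--         if ch == "\\":
--             i += 2
--         elif ch == "'" or ch == '"':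
--             j = i + 1
--             while j < n and s[j] != ch:
--                 j += 2 if s[j] == "\\" else 1
--             i = j + 1
--         elif ch == "=" or ch == ":":
--             return s[:i].strip(), s[i + 1 :].strip()
--         else:
--             i += 1
--     return None, None
-- ===== Notes on version B (the rewrite author's own statement) =====
-- stated objective: alternative
-- what changed: Replaced A's character-by-character flag state machine (in_single/in_double/escaped booleans) with a structured scanner that jumps over escape pairs and consumes whole quoted regions in a dedicated inner loop, so the outer loop only ever sees unquoted characters.
import Mathlib
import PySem

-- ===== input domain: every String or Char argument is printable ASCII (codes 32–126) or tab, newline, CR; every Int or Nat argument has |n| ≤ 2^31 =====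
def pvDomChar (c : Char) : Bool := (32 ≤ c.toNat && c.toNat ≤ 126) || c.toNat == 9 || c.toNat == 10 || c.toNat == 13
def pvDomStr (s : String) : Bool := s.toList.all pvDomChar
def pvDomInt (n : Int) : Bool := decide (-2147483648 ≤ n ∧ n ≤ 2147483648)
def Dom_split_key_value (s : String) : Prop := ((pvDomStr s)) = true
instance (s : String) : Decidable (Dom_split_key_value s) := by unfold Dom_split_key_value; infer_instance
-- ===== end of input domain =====

-- B replaces A's flag-based state machine by a structured scanner that jumps over escape
-- pairs and consumes whole quoted regions with an inner skipping loop (objective: alternative).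

-- shared result expression: s[:idx].strip(), s[idx+1:].strip() (idx is a valid index, so the slices are take/drop)
def pvSplitAt (cs : List Char) (idx : Nat) : Option String × Option String :=
  (some (PySem.Str.strip (String.mk (cs.take idx))),
   some (PySem.Str.strip (String.mk (cs.drop (idx + 1)))))

-- ===== PORT A =====
-- A's for-loop over enumerate(s) with the three flags in_single / in_double / escaped
def aLoop (cs : List Char) (l : List Char) (idx : Nat) (sgl dbl esc : Bool) :
    Option String × Option String :=
  match l with
  | [] => (none, none)
  | ch :: rest =>
    if esc then aLoop cs rest (idx + 1) sgl dbl false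
    else if ch = '\\' then aLoop cs rest (idx + 1) sgl dbl true
    else if ch = '\'' ∧ ¬ dbl then aLoop cs rest (idx + 1) (!sgl) dbl false
    else if ch = '"' ∧ ¬ sgl then aLoop cs rest (idx + 1) sgl (!dbl) false
    else if (¬ sgl ∧ ¬ dbl) ∧ (ch = '=' ∨ ch = ':') then pvSplitAt cs idx
    else aLoop cs rest (idx + 1) sgl dbl false

def split_key_value (s : String) : Option String × Option String :=
  aLoop s.toList s.toList 0 false false false

-- ===== PORT B =====
-- Source B's two while loops, inner loop = bQuoted (scan for the closing quote q,
-- jumping over escape pairs; on "i = j + 1" control returns to the outer loop bLoop);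
-- running past the end of the string (i or j pushed beyond n) exits with (None, None).
mutual
def bLoop (cs : List Char) (l : List Char) (i : Nat) : Option String × Option String :=
  match l with
  | [] => (none, none)
  | c :: rest =>
    if c = '\\' then
      match rest with
      | [] => (none, none)              -- i + 2 ran past the end: loop exits
      | _ :: rest2 => bLoop cs rest2 (i + 2)
    else if c = '\'' ∨ c = '"' then bQuoted c cs rest (i + 1)
    else if c = '=' ∨ c = ':' then pvSplitAt cs i
    else bLoop cs rest (i + 1)

def bQuoted (q : Char) (cs : List Char) (l : List Char) (j : Nat) :
    Option String × Option String :=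
  match l with
  | [] => (none, none)                  -- unterminated quote: i = j + 1 ≥ n, outer loop exits
  | c :: rest =>
    if c = q then bLoop cs rest (j + 1)
    else if c = '\\' then
      match rest with
      | [] => (none, none)              -- j + 2 ran past the end, then i = j + 1 > n
      | _ :: rest2 => bQuoted q cs rest2 (j + 2)
    else bQuoted q cs rest (j + 1)
end

def split_key_value_alt (s : String) : Option String × Option String :=
  bLoop s.toList s.toList 0

-- ===== PRECONDITION & SPEC =====
def Spec_split_key_value (s : String) (out : Option String × Option String) : Prop := out = split_key_value_alt s
instance (s : String) (out : Option String × Option String) : Decidable (Spec_split_key_value s out) := by unfold Spec_split_key_value; infer_instance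

-- ===== CLAIM (what is proved, stated in full; the proofs are below) =====
def Claim_equal_split_key_value : Prop := ∀ (s : String), Dom_split_key_value s → Spec_split_key_value s (split_key_value s)

-- ===== LEMMAS AND PROOFS =====

-- Main correspondence, by strong induction on the suffix length:
-- in the neutral state A's loop is B's outer loop, and inside a single (resp. double)
-- quote A's loop is B's inner skipping loop for that quote character.
theorem aLoop_eq_bLoop (cs : List Char) :
    ∀ (n : Nat) (l : List Char), l.length ≤ n → ∀ (j : Nat),
      aLoop cs l j false false false = bLoop cs l j ∧
      aLoop cs l j true false false = bQuoted '\'' cs l j ∧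
      aLoop cs l j false true false = bQuoted '"' cs l j := by
  intro n
  induction n with
  | zero =>
    intro l hl j
    have : l = [] := List.length_eq_zero_iff.mp (Nat.le_zero.mp hl)
    subst this
    simp [aLoop, bLoop, bQuoted]
  | succ n ih =>
    intro l hl j
    match l with
    | [] => simp [aLoop, bLoop, bQuoted]
    | ch :: rest =>
      have hrest : rest.length ≤ n := by simpa using hl
      refine ⟨?_, ?_, ?_⟩
      · -- neutral state
        rw [bLoop.eq_def]
        simp only [aLoop]
        by_cases hbs : ch = '\\'
        · subst hbs
          -- escape: A sets escaped and the next char is consumed by the esc branch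
          match rest, hrest with
          | [], _ => simp [aLoop]
          | c2 :: rest2, hr =>
            have h2 : rest2.length ≤ n := by simp at hr; omega
            simp only [aLoop, Char.reduceEq, if_true]
            exact (ih rest2 h2 (j + 2)).1
        · by_cases hsq : ch = '\''
          · subst hsq
            simp
            exact (ih rest hrest (j + 1)).2.1
          · by_cases hdq : ch = '"'
            · subst hdq
              simp
              exact (ih rest hrest (j + 1)).2.2
            · by_cases hsep : ch = '=' ∨ ch = ':'
              · simp [hbs, hsq, hdq, hsep]
              · simp [hbs, hsq, hdq, hsep]
                exact (ih rest hrest (j + 1)).1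
      · -- inside a single-quoted region
        rw [bQuoted.eq_def]
        simp only [aLoop]
        by_cases hbs : ch = '\\'
        · subst hbs
          match rest, hrest with
          | [], _ => simp [aLoop]
          | c2 :: rest2, hr =>
            have h2 : rest2.length ≤ n := by simp at hr; omega
            simp only [aLoop, Char.reduceEq, if_true]
            exact (ih rest2 h2 (j + 2)).2.1
        · by_cases hsq : ch = '\''
          · subst hsq
            simp
            exact (ih rest hrest (j + 1)).1
          · -- every other char (incl. '"', '=', ':') is skipped inside the quote
            simp [hbs, hsq]
            exact (ih rest hrest (j + 1)).2.1
      · -- inside a double-quoted region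
        rw [bQuoted.eq_def]
        simp only [aLoop]
        by_cases hbs : ch = '\\'
        · subst hbs
          match rest, hrest with
          | [], _ => simp [aLoop]
          | c2 :: rest2, hr =>
            have h2 : rest2.length ≤ n := by simp at hr; omega
            simp only [aLoop, Char.reduceEq, if_true]
            exact (ih rest2 h2 (j + 2)).2.2
        · by_cases hdq : ch = '"'
          · subst hdq
            simp
            exact (ih rest hrest (j + 1)).1
          · simp [hbs, hdq]
            exact (ih rest hrest (j + 1)).2.2

-- ===== VERDICT (by name: the statement is the Claim_ definition above) =====
theorem split_key_value_spec : Claim_equal_split_key_value := by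
  intro s _
  unfold Spec_split_key_value split_key_value split_key_value_alt
  exact (aLoop_eq_bLoop s.toList s.toList.length s.toList le_rfl 0).1
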